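-- pv_equiv track=rewrite | github.com/aaronrwang/ND-coursework | data-structures/HW11B - Graph Algorithms/passcode.py | compute_degrees
-- ===== SOURCE A (Python) =====
-- Graph   = dict[int, set[int]]
--
-- Degrees = dict[int, int]
--
-- def compute_degrees(graph: Graph) -> Degrees:
--     degrees:Degrees = {}
--     for key in graph:
--         degrees[key] = 0
--     for key in graph:
--         for value in graph[key]:
--             if value not in degrees:
--                 degrees[value] = 0
--             degrees[value]+=1
--     return degrees
-- ===== SOURCE B (Python) =====
-- # Count-by-query: instead of incrementing a table per edge, compute each node's
-- # in-degree directly as the number of adjacency sets containing it; the output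
-- # key order (graph keys, then first-seen targets) is built in a separate pass.
-- def compute_degrees(graph):
--     order = list(graph)
--     seen = set(order)
--     for targets in graph.values():
--         for v in targets:
--             if v not in seen:
--                 seen.add(v)
--                 order.append(v)
--     return {v: sum(1 for s in graph.values() if v in s) for v in order}
-- ===== Notes on version B (the rewrite author's own statement) =====
-- stated objective: alternative
-- what changed: B has no increment table at all: it first builds the output key order (graph keys then first-seen targets), then computes each node's in-degree by querying every adjacency set for membership and counting the hits (valid because adjacency lists are sets, so each set contributes at most one edge into a node).
import Mathlib
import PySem

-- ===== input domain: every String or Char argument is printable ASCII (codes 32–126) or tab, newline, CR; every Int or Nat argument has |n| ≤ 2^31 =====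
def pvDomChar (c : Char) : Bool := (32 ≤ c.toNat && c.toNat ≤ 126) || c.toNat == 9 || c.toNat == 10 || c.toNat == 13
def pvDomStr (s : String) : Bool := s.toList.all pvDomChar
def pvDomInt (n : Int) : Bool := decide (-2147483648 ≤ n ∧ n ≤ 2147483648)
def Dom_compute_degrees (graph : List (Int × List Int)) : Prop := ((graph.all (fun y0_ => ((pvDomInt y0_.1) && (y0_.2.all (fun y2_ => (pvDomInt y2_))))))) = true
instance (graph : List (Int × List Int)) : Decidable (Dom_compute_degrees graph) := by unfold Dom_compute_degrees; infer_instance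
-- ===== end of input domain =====

-- B keeps no increment table: it builds the output key order first, then computes each
-- node's in-degree by counting how many adjacency sets contain it ("alternative").

-- ===== PORT A =====
def compute_degrees (graph : List (Int × List Int)) : List (Int × Int) :=
  let degrees0 : PySem.Dict Int Int :=
    graph.foldl (fun d p => d.insert p.1 0) PySem.Dict.empty
  let degrees : PySem.Dict Int Int :=
    graph.foldl (fun d p =>
      p.2.foldl (fun d v =>
        (if d.contains v then d else d.insert v 0).modify v 0 (· + 1)) d) degrees0
  degrees.items

-- ===== PORT B =====
def compute_degrees_alt (graph : List (Int × List Int)) : List (Int × Int) :=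
  let order0 : List Int := graph.map (·.1)
  let st : List Int × PySem.Set Int :=
    graph.foldl (fun st p =>
      p.2.foldl (fun (st : List Int × PySem.Set Int) v =>
        if st.2.contains v then st else (st.1 ++ [v], st.2.add v)) st)
      (order0, PySem.Set.ofList order0)
  st.1.map (fun v =>
    (v, graph.foldl (fun a p => if PySem.Set.contains p.2 v then a + 1 else a) (0 : Int)))

-- ===== PRECONDITION & SPEC =====
-- The Python argument is a dict of sets: keys are necessarily distinct and each
-- adjacency set has distinct elements; lists with duplicates represent no Python input.
def Pre_compute_degrees (graph : List (Int × List Int)) : Prop :=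
  (graph.map Prod.fst).Nodup ∧ ∀ p ∈ graph, p.2.Nodup
instance (graph : List (Int × List Int)) : Decidable (Pre_compute_degrees graph) := by
  unfold Pre_compute_degrees; infer_instance
def pvWitness_compute_degrees : (List (Int × List Int)) := [(1, [2, 3]), (2, [1]), (3, [5, 1])]
def Spec_compute_degrees (graph : List (Int × List Int)) (out : List (Int × Int)) : Prop := out = compute_degrees_alt graph
instance (graph : List (Int × List Int)) (out : List (Int × Int)) : Decidable (Spec_compute_degrees graph out) := by unfold Spec_compute_degrees; infer_instance

-- ===== CLAIM (what is proved, stated in full; the proofs are below) =====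
def Claim_equal_compute_degrees : Prop := ∀ (graph : List (Int × List Int)), Dom_compute_degrees graph → Pre_compute_degrees graph → Spec_compute_degrees graph (compute_degrees graph)

-- ===== LEMMAS AND PROOFS =====

-- A's per-edge step ('if missing insert 0, then += 1') is one Dict.modify.
lemma bump_eq (d : PySem.Dict Int Int) (v : Int) :
    (if d.contains v then d else d.insert v 0).modify v 0 (· + 1) = d.modify v 0 (· + 1) := by
  by_cases h : d.contains v
  · simp [h]
  · simp only [Bool.not_eq_true] at h
    simp [h, PySem.Dict.modify, PySem.Dict.getD_insert_self,
      PySem.Dict.insert_insert_self, PySem.Dict.getD_of_not_contains _ _ h]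

-- The initial all-zero dictionary looks up to 0 at every key.
lemma getD_zero_init (graph : List (Int × List Int)) (k : Int) :
    (graph.foldl (fun d p => d.insert p.1 (0 : Int)) PySem.Dict.empty).getD k 0 = 0 := by
  suffices h : ∀ (d : PySem.Dict Int Int), d.getD k 0 = 0 →
      (graph.foldl (fun d p => d.insert p.1 (0 : Int)) d).getD k 0 = 0 by
    exact h _ (by simp [PySem.Dict.getD_empty])
  induction graph with
  | nil => intro d hd; simpa using hd
  | cons p t ih =>
      intro d hd
      exact ih _ (by rw [PySem.Dict.getD_insert]; split <;> simp [hd])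

-- B's key-order loop, run from the diagonal state (s, s), is Set.update.
lemma diag_fold (l : List Int) (s : PySem.Set Int) :
    (l.foldl (fun (st : List Int × PySem.Set Int) v =>
        if st.2.contains v then st else (st.1 ++ [v], st.2.add v)) (s, s))
      = (PySem.Set.update s l, PySem.Set.update s l) := by
  induction l generalizing s with
  | nil => simp [PySem.Set.update_nil]
  | cons v t ih =>
      rw [List.foldl_cons, PySem.Set.update_cons]
      by_cases h : s.contains v
      · have hm : v ∈ s := (PySem.Set.contains_iff s v).mp h
        simp only [h, if_true]
        rw [show PySem.Set.add s v = s by simp [PySem.Set.add, hm]]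
        exact ih s
      · have hm : v ∉ s := fun hv => h ((PySem.Set.contains_iff s v).mpr hv)
        simp only [h]
        rw [show PySem.Set.add s v = s ++ [v] by simp [PySem.Set.add, hm]]
        exact ih (s ++ [v])

-- B's counting loop is the count of the node among all edges (adjacency lists nodup).
lemma count_fold (graph : List (Int × List Int)) (k : Int)
    (hnd : ∀ p ∈ graph, p.2.Nodup) (a : Int) :
    graph.foldl (fun a p => if PySem.Set.contains p.2 k then a + 1 else a) a
      = a + ((graph.flatMap (fun p => p.2)).count k : Int) := by
  induction graph generalizing a with
  | nil => simp
  | cons p t ih =>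
      have hp : p.2.Nodup := hnd p (by simp)
      have ht : ∀ q ∈ t, q.2.Nodup := fun q hq => hnd q (by simp [hq])
      rw [List.foldl_cons, ih ht, List.flatMap_cons, List.count_append]
      by_cases h : k ∈ p.2
      · have h1 : p.2.count k = 1 := List.count_eq_one_of_mem hp h
        simp [h, h1]; ring
      · have h0 : p.2.count k = 0 := List.count_eq_zero.mpr h
        simp [h, h0]

-- ===== VERDICT (by name: the statement is the Claim_ definition above) =====
theorem compute_degrees_spec : Claim_equal_compute_degrees := by
  intro graph _ hpre
  obtain ⟨hkeys, hsets⟩ := hpre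
  have hkeys' : (graph.map (fun x : Int × List Int => x.1)).Nodup := hkeys
  unfold Spec_compute_degrees compute_degrees compute_degrees_alt
  simp only []
  set keys := graph.map (·.1) with hk
  set edges := graph.flatMap (fun p => p.2) with he
  set d0 := graph.foldl (fun d p => d.insert p.1 (0 : Int)) PySem.Dict.empty with hd0
  -- A's nested loop is one fold over the flattened edges, with the simplified step
  have hA : (graph.foldl (fun d p =>
        p.2.foldl (fun d v =>
          (if d.contains v then d else d.insert v 0).modify v 0 (· + 1)) d) d0)
      = edges.foldl (fun d v => d.modify v 0 (· + 1)) d0 := by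
    rw [he, List.foldl_flatMap]
    refine PySem.List.foldl_congr_mem _ _ _ _ ?_
    intro d p _
    exact PySem.List.foldl_congr_mem _ _ _ _ (fun d' v _ => bump_eq d' v)
  rw [hA]
  set d := edges.foldl (fun d v => d.modify v 0 (· + 1)) d0 with hd
  -- A's keys
  have hk0 : d0.keys = keys := by
    rw [hd0, PySem.Dict.keys_foldl_insert_key (key := Prod.fst) (f := fun _ _ => (0 : Int)),
      PySem.Dict.keys_empty, PySem.Set.update_nil_left,
      PySem.Set.ofList_eq_self_of_nodup _ hkeys]
  have hdk : d.keys = PySem.Set.update keys edges := by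
    rw [hd, PySem.Dict.keys_foldl_modify, hk0]
  have hnd : d.keys.Nodup := by
    rw [hdk]; exact PySem.Set.nodup_update _ _ hkeys'
  -- B's key order is the same list
  have hB : (graph.foldl (fun st p =>
        p.2.foldl (fun (st : List Int × PySem.Set Int) v =>
          if st.2.contains v then st else (st.1 ++ [v], st.2.add v)) st)
        (keys, PySem.Set.ofList keys)).1 = PySem.Set.update keys edges := by
    rw [PySem.Set.ofList_eq_self_of_nodup _ hkeys, ← List.foldl_flatMap, diag_fold]
  rw [hB, PySem.Dict.items_eq_map_keys d hnd 0, hdk]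
  refine List.map_congr_left ?_
  intro k _
  have hAv : d.getD k 0 = (edges.count k : Int) := by
    rw [hd, PySem.Dict.getD_foldl_modify_add_one, hd0, getD_zero_init, zero_add]
  rw [hAv, count_fold graph k hsets 0, zero_add, he]
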